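-- pv_equiv track=rewrite | github.com/JGeanca/Security | TP1/hashMatcher/indexes/IndexCalc.py | distribute_indices
-- ===== SOURCE A (Python) =====
-- def distribute_indices(num_indices, num_computers):
--     indices_per_computer = num_indices // num_computers
--     extra_indices = num_indices % num_computers
--     indices = []
--     start_index = 0
--     for i in range(num_computers):
--         end_index = start_index + indices_per_computer
--         if i < extra_indices:
--             end_index += 1
--         indices.append((start_index, end_index))
--         start_index = end_index
--     return indices
-- ===== SOURCE B (Python) =====
-- def distribute_indices(num_indices, num_computers):
--     q = num_indices // num_computers
--     r = num_indices % num_computers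
--     return [(i * q + min(i, r), (i + 1) * q + min(i + 1, r))
--             for i in range(num_computers)]
-- ===== Notes on version B (the rewrite author's own statement) =====
-- stated objective: simpler
-- what changed: Replaces the running start_index accumulator loop with a single list comprehension computing each block independently from its index via the closed form (i*q+min(i,r), (i+1)*q+min(i+1,r)).
import Mathlib
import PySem

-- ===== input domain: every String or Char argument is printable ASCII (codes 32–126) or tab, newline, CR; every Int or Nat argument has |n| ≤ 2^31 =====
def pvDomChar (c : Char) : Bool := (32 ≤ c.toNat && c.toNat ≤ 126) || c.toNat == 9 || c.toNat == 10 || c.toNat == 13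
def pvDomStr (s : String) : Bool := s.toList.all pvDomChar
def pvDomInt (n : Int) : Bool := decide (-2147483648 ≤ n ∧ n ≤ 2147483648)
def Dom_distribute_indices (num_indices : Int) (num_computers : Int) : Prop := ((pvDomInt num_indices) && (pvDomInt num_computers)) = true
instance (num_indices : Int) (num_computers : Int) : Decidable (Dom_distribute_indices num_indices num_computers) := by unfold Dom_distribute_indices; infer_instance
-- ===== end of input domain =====

-- B replaces A's running start_index accumulator with a closed-form list comprehension (objective: simpler).

-- ===== PORT A =====
def distribute_indices (num_indices : Int) (num_computers : Int) : List (Int × Int) :=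
  let indices_per_computer := PySem.Int.floordiv num_indices num_computers
  let extra_indices := PySem.Int.mod num_indices num_computers
  let st := (PySem.List.pyRange 0 num_computers 1).foldl
    (fun (s : List (Int × Int) × Int) i =>
      let end_index := s.2 + indices_per_computer
      let end_index := if i < extra_indices then end_index + 1 else end_index
      (s.1 ++ [(s.2, end_index)], end_index))
    ([], 0)
  st.1

-- ===== PORT B =====
def distribute_indices_alt (num_indices : Int) (num_computers : Int) : List (Int × Int) :=
  let q := PySem.Int.floordiv num_indices num_computers
  let r := PySem.Int.mod num_indices num_computers
  (PySem.List.pyRange 0 num_computers 1).map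
    (fun i => (i * q + min i r, (i + 1) * q + min (i + 1) r))

-- ===== PRECONDITION & SPEC =====
-- Pre_ excludes exactly num_computers = 0, where Python A raises ZeroDivisionError.
def Pre_distribute_indices (num_indices : Int) (num_computers : Int) : Prop := num_computers ≠ 0
instance (num_indices : Int) (num_computers : Int) : Decidable (Pre_distribute_indices num_indices num_computers) := by unfold Pre_distribute_indices; infer_instance
def pvWitness_distribute_indices : Int × Int := (10, 3)

def Spec_distribute_indices (num_indices : Int) (num_computers : Int) (out : List (Int × Int)) : Prop := out = distribute_indices_alt num_indices num_computers
instance (num_indices : Int) (num_computers : Int) (out : List (Int × Int)) : Decidable (Spec_distribute_indices num_indices num_computers out) := by unfold Spec_distribute_indices; infer_instance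

-- ===== CLAIM (what is proved, stated in full; the proofs are below) =====
def Claim_equal_distribute_indices : Prop := ∀ (num_indices : Int) (num_computers : Int), Dom_distribute_indices num_indices num_computers → Pre_distribute_indices num_indices num_computers → Spec_distribute_indices num_indices num_computers (distribute_indices num_indices num_computers)

-- ===== LEMMAS AND PROOFS =====

-- Loop invariant: starting the fold at index a with accumulator a*q + min a r
-- produces exactly the closed-form blocks for indices a..nc-1.
lemma distribute_loop_eq (q r nc : Int) : ∀ (n : Nat) (a : Int), (nc - a).toNat = n →
    ∀ (pref : List (Int × Int)),
    ((PySem.List.pyRange a nc 1).foldl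
      (fun (s : List (Int × Int) × Int) i =>
        let e := s.2 + q
        let e := if i < r then e + 1 else e
        (s.1 ++ [(s.2, e)], e))
      (pref, a * q + min a r)).1
    = pref ++ (PySem.List.pyRange a nc 1).map
        (fun i => (i * q + min i r, (i + 1) * q + min (i + 1) r)) := by
  intro n
  induction n with
  | zero =>
    intro a ha pref
    rw [PySem.List.pyRange_one_eq_nil (by omega)]
    simp
  | succ n ih =>
    intro a ha pref
    rw [PySem.List.pyRange_one_cons (by omega)]
    simp only [List.foldl_cons, List.map_cons]
    have he : (if a < r then a * q + min a r + q + 1 else a * q + min a r + q)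
        = (a + 1) * q + min (a + 1) r := by
      split_ifs with h
      · have h1 : min a r = a := by omega
        have h2 : min (a + 1) r = a + 1 := by omega
        rw [h1, h2]; ring
      · have h1 : min a r = r := by omega
        have h2 : min (a + 1) r = r := by omega
        rw [h1, h2]; ring
    have := ih (a + 1) (by omega) (pref ++ [(a * q + min a r, (a + 1) * q + min (a + 1) r)])
    simp only [List.append_assoc, List.cons_append, List.nil_append] at this ⊢
    split_ifs at he ⊢ with h
    · rw [he]; exact this
    · rw [he]; exact this

-- ===== VERDICT (by name: the statement is the Claim_ definition above) =====
theorem distribute_indices_spec : Claim_equal_distribute_indices := by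
  intro ni nc _ hpre
  unfold Spec_distribute_indices distribute_indices distribute_indices_alt
  simp only []
  by_cases hpos : 0 < nc
  · have hr : 0 ≤ PySem.Int.mod ni nc := PySem.Int.mod_nonneg ni hpos
    have h := distribute_loop_eq (PySem.Int.floordiv ni nc) (PySem.Int.mod ni nc) nc
      (nc - 0).toNat 0 rfl []
    rw [show (0 : Int) * (PySem.Int.floordiv ni nc) + min 0 (PySem.Int.mod ni nc) = 0 by
      have hm : min (0 : Int) (PySem.Int.mod ni nc) = 0 := by omega
      rw [hm]; ring] at h
    simpa using h
  · rw [PySem.List.pyRange_one_eq_nil (by omega)]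
    simp
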